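-- pv_equiv track=rewrite | github.com/RCdeWit/advent-of-code | 2019/day_10/main.py | find_lines_of_sight
-- ===== SOURCE A (Python) =====
-- def find_lines_of_sight(asteroids: list, base: tuple) -> list:
--     base_x, base_y = base
--     result = []
--     for asteroid in asteroids:
--         if asteroid == base:
--             continue
--
--         view = True
--         ast_x, ast_y = asteroid
--         for obstacle in asteroids:
--             if obstacle == asteroid or obstacle == base:
--                 continue
--
--             obs_x, obs_y = obstacle
--             cross_product = (obs_y - base_y) * (ast_x - base_x) - (ast_y - base_y) * (obs_x - base_x)
--             if (
--                 cross_product == 0 and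
--                 min(base_x, ast_x) <= obs_x <= max(base_x, ast_x) and
--                 min(base_y, ast_y) <= obs_y <= max(base_y, ast_y)
--             ):
--                 # Obstacles interferes with base and asteroid
--                 view = False
--                 break
--
--         if view:
--             result.append(asteroid)
--
--     return result
-- ===== SOURCE B (Python) =====
-- from math import gcd
--
-- def find_lines_of_sight(asteroids: list, base: tuple) -> list:
--     # Group asteroids by normalized direction from base; only the nearest in each
--     # direction is visible. One pass to find the per-direction minimum step count,
--     # one pass to emit the visible asteroids in original order.
--     base_x, base_y = base
--     nearest = {}
--     for ast_x, ast_y in asteroids: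
--         dx, dy = ast_x - base_x, ast_y - base_y
--         if dx == 0 and dy == 0:
--             continue
--         g = gcd(dx, dy)
--         key = (dx // g, dy // g)
--         if key not in nearest or g < nearest[key]:
--             nearest[key] = g
--     result = []
--     for asteroid in asteroids:
--         dx, dy = asteroid[0] - base_x, asteroid[1] - base_y
--         if dx == 0 and dy == 0:
--             continue
--         g = gcd(dx, dy)
--         if nearest[(dx // g, dy // g)] == g:
--             result.append(asteroid)
--     return result
-- ===== Notes on version B (the rewrite author's own statement) =====
-- stated objective: faster
-- what changed: Replaced A's all-pairs collinearity/bounding-box blocking test by grouping asteroids by their gcd-normalized direction from the base in one dict pass (an asteroid is visible iff its gcd step count is the minimum of its direction group), then a second pass emits visible asteroids in original order.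
import Mathlib
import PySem

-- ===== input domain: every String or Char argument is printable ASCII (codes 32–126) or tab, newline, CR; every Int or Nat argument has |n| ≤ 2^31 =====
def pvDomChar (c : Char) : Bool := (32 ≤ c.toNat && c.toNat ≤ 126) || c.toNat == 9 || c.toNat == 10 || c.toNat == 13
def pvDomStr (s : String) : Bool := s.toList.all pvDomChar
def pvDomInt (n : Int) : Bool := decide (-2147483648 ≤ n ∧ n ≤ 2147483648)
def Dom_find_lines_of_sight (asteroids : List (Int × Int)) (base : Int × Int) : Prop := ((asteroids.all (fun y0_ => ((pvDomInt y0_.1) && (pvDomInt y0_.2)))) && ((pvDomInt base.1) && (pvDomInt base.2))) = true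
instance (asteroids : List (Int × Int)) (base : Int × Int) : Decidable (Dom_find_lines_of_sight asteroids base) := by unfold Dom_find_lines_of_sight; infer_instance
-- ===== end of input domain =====

-- B replaces A's all-pairs blocking test by grouping the asteroids by their
-- gcd-normalized direction from the base (visible = nearest in its direction),
-- turning the quadratic scan into two linear passes over the list.

-- ===== PORT A =====

-- the body of A's inner loop: does obstacle q block the view from base to p?
def pvBlocks (base p q : Int × Int) : Bool :=
  decide ((q.2 - base.2) * (p.1 - base.1) - (p.2 - base.2) * (q.1 - base.1) = 0)
    && decide (min base.1 p.1 ≤ q.1) && decide (q.1 ≤ max base.1 p.1)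
    && decide (min base.2 p.2 ≤ q.2) && decide (q.2 ≤ max base.2 p.2)

-- A's inner `for obstacle in asteroids` loop with its early break: the final `view` flag
def pvView (base p : Int × Int) : List (Int × Int) → Bool
  | [] => true
  | q :: rest =>
    if q = p ∨ q = base then pvView base p rest
    else if pvBlocks base p q then false
    else pvView base p rest

def find_lines_of_sight (asteroids : List (Int × Int)) (base : Int × Int) : List (Int × Int) :=
  asteroids.foldl (fun result asteroid =>
    if asteroid = base then result
    else if pvView base asteroid asteroids then result ++ [asteroid]
    else result) []

-- ===== PORT B =====

-- (dx, dy) from base to a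
def pvDelta (base a : Int × Int) : Int × Int := (a.1 - base.1, a.2 - base.2)

-- g = math.gcd(dx, dy)
def pvG (v : Int × Int) : Int := (Int.gcd v.1 v.2 : Int)

-- key = (dx // g, dy // g)
def pvN (v : Int × Int) : Int × Int :=
  (PySem.Int.floordiv v.1 (pvG v), PySem.Int.floordiv v.2 (pvG v))

-- first pass: nearest[key] = min step count g in that direction
def pvNearest (base : Int × Int) (asteroids : List (Int × Int)) :
    PySem.Dict (Int × Int) Int :=
  asteroids.foldl (fun d a =>
    let v := pvDelta base a
    if v.1 = 0 ∧ v.2 = 0 then d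
    else
      match d.get? (pvN v) with
      | none => d.insert (pvN v) (pvG v)
      | some m => if pvG v < m then d.insert (pvN v) (pvG v) else d)
    PySem.Dict.empty

def find_lines_of_sight_alt (asteroids : List (Int × Int)) (base : Int × Int) : List (Int × Int) :=
  let nearest := pvNearest base asteroids
  asteroids.foldl (fun result asteroid =>
    let v := pvDelta base asteroid
    if v.1 = 0 ∧ v.2 = 0 then result
    else if nearest.getD (pvN v) 0 = pvG v then result ++ [asteroid]
    else result) []

-- ===== PRECONDITION & SPEC =====
def Spec_find_lines_of_sight (asteroids : List (Int × Int)) (base : Int × Int) (out : List (Int × Int)) : Prop := out = find_lines_of_sight_alt asteroids base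
instance (asteroids : List (Int × Int)) (base : Int × Int) (out : List (Int × Int)) : Decidable (Spec_find_lines_of_sight asteroids base out) := by unfold Spec_find_lines_of_sight; infer_instance

-- ===== CLAIM (what is proved, stated in full; the proofs are below) =====
def Claim_equal_find_lines_of_sight : Prop := ∀ (asteroids : List (Int × Int)) (base : Int × Int), Dom_find_lines_of_sight asteroids base → Spec_find_lines_of_sight asteroids base (find_lines_of_sight asteroids base)

-- ===== LEMMAS AND PROOFS =====

-- A's blocking condition, written on the displacement vectors v = p - base, w = q - base
def pvBlocksRel (v w : Int × Int) : Prop :=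
  w.2 * v.1 - v.2 * w.1 = 0 ∧
  min 0 v.1 ≤ w.1 ∧ w.1 ≤ max 0 v.1 ∧ min 0 v.2 ≤ w.2 ∧ w.2 ≤ max 0 v.2

lemma pvBlocks_iff (base p q : Int × Int) :
    pvBlocks base p q = true ↔ pvBlocksRel (pvDelta base p) (pvDelta base q) := by
  simp only [pvBlocks, pvBlocksRel, pvDelta, Bool.and_eq_true, decide_eq_true_eq]
  constructor
  · rintro ⟨⟨⟨⟨h1, h2⟩, h3⟩, h4⟩, h5⟩
    refine ⟨by ring_nf; ring_nf at h1; linarith, by omega, by omega, by omega, by omega⟩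
  · rintro ⟨h1, h2, h3, h4, h5⟩
    refine ⟨⟨⟨⟨by ring_nf; ring_nf at h1; linarith, by omega⟩, by omega⟩, by omega⟩, by omega⟩

-- decomposition: v ≠ 0 → v = g • n with g = gcd > 0 and n primitive
lemma pvG_pos (v : Int × Int) (hv : v ≠ (0, 0)) : 0 < pvG v := by
  have : v.1 ≠ 0 ∨ v.2 ≠ 0 := by
    by_contra h; push_neg at h
    exact hv (Prod.ext_iff.mpr ⟨h.1, h.2⟩)
  unfold pvG
  exact_mod_cast Int.gcd_pos_iff.mpr this

lemma pvN_decomp (v : Int × Int) (hv : v ≠ (0, 0)) :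
    v.1 = pvG v * (pvN v).1 ∧ v.2 = pvG v * (pvN v).2 ∧ Int.gcd (pvN v).1 (pvN v).2 = 1 := by
  have hg := pvG_pos v hv
  have hgn : 0 < Int.gcd v.1 v.2 := by unfold pvG at hg; exact_mod_cast hg
  have e1 : (pvN v).1 = v.1 / pvG v := PySem.Int.floordiv_eq_ediv_of_pos hg
  have e2 : (pvN v).2 = v.2 / pvG v := PySem.Int.floordiv_eq_ediv_of_pos hg
  refine ⟨?_, ?_, ?_⟩
  · rw [e1]; exact (Int.mul_ediv_cancel' (Int.gcd_dvd_left v.1 v.2)).symm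
  · rw [e2]; exact (Int.mul_ediv_cancel' (Int.gcd_dvd_right v.1 v.2)).symm
  · rw [e1, e2]; exact Int.gcd_div_gcd_div_gcd hgn

-- sign/magnitude bounds along one coordinate
lemma pvBnd_fwd (u t g : Int) (hu : u ≠ 0) (hg : 0 < g)
    (h1 : min 0 (g * u) ≤ u * t) (h2 : u * t ≤ max 0 (g * u)) : 0 ≤ t ∧ t ≤ g := by
  rcases lt_trichotomy u 0 with h | h | h
  · rw [min_eq_right (by nlinarith)] at h1
    rw [max_eq_left (by nlinarith)] at h2
    constructor <;> nlinarith
  · exact absurd h hu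
  · rw [min_eq_left (by nlinarith)] at h1
    rw [max_eq_right (by nlinarith)] at h2
    constructor <;> nlinarith

lemma pvBnd_rev (u t g : Int) (h0 : 0 ≤ t) (h1 : t ≤ g) :
    min 0 (g * u) ≤ u * t ∧ u * t ≤ max 0 (g * u) := by
  rcases lt_trichotomy u 0 with h | h | h
  · rw [min_eq_right (by nlinarith), max_eq_left (by nlinarith)]
    constructor <;> nlinarith
  · subst h; simp
  · rw [min_eq_left (by nlinarith), max_eq_right (by nlinarith)]
    constructor <;> nlinarith

-- the geometric heart: for v, w ≠ 0, w ≠ v, A's blocking test holds iff w has the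
-- same normalized direction as v and strictly fewer gcd steps
lemma pvBlocksRel_iff (v w : Int × Int) (hv : v ≠ (0, 0)) (hw : w ≠ (0, 0)) (hne : w ≠ v) :
    pvBlocksRel v w ↔ (pvN w = pvN v ∧ pvG w < pvG v) := by
  obtain ⟨hv1, hv2, hvc⟩ := pvN_decomp v hv
  obtain ⟨hw1, hw2, hwc⟩ := pvN_decomp w hw
  have hgv := pvG_pos v hv
  have hgw := pvG_pos w hw
  have hw12 : w.1 ≠ 0 ∨ w.2 ≠ 0 := by
    by_contra h; push_neg at h; exact hw (Prod.ext_iff.mpr ⟨h.1, h.2⟩)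
  constructor
  · rintro ⟨hcross, hb1, hb2, hb3, hb4⟩
    obtain ⟨t, ht1, ht2⟩ : ∃ t, w.1 = (pvN v).1 * t ∧ w.2 = (pvN v).2 * t := by
      by_cases hu0 : (pvN v).1 = 0
      · have hv10 : v.1 = 0 := by rw [hv1, hu0]; ring
        have hw10 : w.1 = 0 := by rw [hv10] at hb1 hb2; omega
        have hs1 : (pvN v).2 * (pvN v).2 = 1 := by
          have hab : (pvN v).2.natAbs = 1 := by
            have h' := hvc; rw [hu0] at h'; simpa [Int.gcd] using h'
          rcases Int.natAbs_eq_iff.mp hab with h | h <;> rw [h] <;> ring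
        exact ⟨(pvN v).2 * w.2, by rw [hw10, hu0]; ring,
               by rw [← mul_assoc, hs1]; ring⟩
      · have hg1ne : pvG v ≠ 0 := by omega
        have hcancel : w.2 * (pvN v).1 = (pvN v).2 * w.1 := by
          refine mul_left_cancel₀ hg1ne ?_
          have : w.2 * v.1 = v.2 * w.1 := by linarith [hcross]
          rw [hv1, hv2] at this; ring_nf; ring_nf at this; linarith
        have hdvd : (pvN v).1 ∣ w.1 := by
          have hcop : IsCoprime (pvN v).1 (pvN v).2 := Int.isCoprime_iff_gcd_eq_one.mpr hvc
          refine hcop.dvd_of_dvd_mul_left ?_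
          exact ⟨w.2, by linarith [hcancel]⟩
        obtain ⟨t, ht⟩ := hdvd
        refine ⟨t, ht, mul_right_cancel₀ hu0 ?_⟩
        rw [hcancel, ht]; ring
    have htne : t ≠ 0 := by
      rintro rfl; simp only [mul_zero] at ht1 ht2
      rcases hw12 with h | h
      · exact h ht1
      · exact h ht2
    have hvnz : (pvN v).1 ≠ 0 ∨ (pvN v).2 ≠ 0 := by
      by_contra h; push_neg at h
      rw [h.1, zero_mul] at ht1
      rw [h.2, zero_mul] at ht2
      rcases hw12 with hx | hx
      · exact hx ht1
      · exact hx ht2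
    have htb : 0 ≤ t ∧ t ≤ pvG v := by
      rcases hvnz with h | h
      · exact pvBnd_fwd _ _ _ h hgv (by rw [← ht1, ← hv1]; exact hb1) (by rw [← ht1, ← hv1]; exact hb2)
      · exact pvBnd_fwd _ _ _ h hgv (by rw [← ht2, ← hv2]; exact hb3) (by rw [← ht2, ← hv2]; exact hb4)
    have htlt : t < pvG v := by
      rcases lt_or_eq_of_le htb.2 with h | h
      · exact h
      · exfalso; apply hne
        refine Prod.ext_iff.mpr ⟨?_, ?_⟩
        · rw [ht1, h, hv1]; ring
        · rw [ht2, h, hv2]; ring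
    have htpos : 0 < t := lt_of_le_of_ne htb.1 (Ne.symm htne)
    have hgweq : pvG w = t := by
      unfold pvG
      rw [ht1, ht2, Int.gcd_mul_right, hvc, one_mul]
      exact Int.natAbs_of_nonneg (le_of_lt htpos)
    have hn1 : (pvN w).1 = (pvN v).1 := by
      refine mul_left_cancel₀ htne ?_
      have h' := hw1; rw [hgweq] at h'
      rw [← h', ht1]; ring
    have hn2 : (pvN w).2 = (pvN v).2 := by
      refine mul_left_cancel₀ htne ?_
      have h' := hw2; rw [hgweq] at h'
      rw [← h', ht2]; ring
    exact ⟨Prod.ext_iff.mpr ⟨hn1, hn2⟩, by rw [hgweq]; exact htlt⟩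
  · rintro ⟨hn, hglt⟩
    have hw1' : w.1 = (pvN v).1 * pvG w := by rw [hw1, hn, mul_comm]
    have hw2' : w.2 = (pvN v).2 * pvG w := by rw [hw2, hn, mul_comm]
    have b1 := pvBnd_rev (pvN v).1 (pvG w) (pvG v) (le_of_lt hgw) (le_of_lt hglt)
    have b2 := pvBnd_rev (pvN v).2 (pvG w) (pvG v) (le_of_lt hgw) (le_of_lt hglt)
    refine ⟨?_, ?_, ?_, ?_, ?_⟩
    · rw [hw1', hw2', hv1, hv2]; ring
    · rw [hw1', hv1]; exact b1.1
    · rw [hw1', hv1]; exact b1.2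
    · rw [hw2', hv2]; exact b2.1
    · rw [hw2', hv2]; exact b2.2

-- characterization of A's inner loop
lemma pvView_iff (base p : Int × Int) (xs : List (Int × Int)) :
    pvView base p xs = true ↔
      ∀ q ∈ xs, q ≠ p → q ≠ base → ¬ pvBlocksRel (pvDelta base p) (pvDelta base q) := by
  induction xs with
  | nil => simp [pvView]
  | cons q rest ih =>
    by_cases hq : q = p ∨ q = base
    · simp only [pvView, if_pos hq]
      rw [ih]
      constructor
      · intro h r hr hrp hrb
        rcases List.mem_cons.mp hr with h1 | h1
        · subst h1; rcases hq with h | h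
          · exact absurd h hrp
          · exact absurd h hrb
        · exact h r h1 hrp hrb
      · intro h r hr hrp hrb; exact h r (List.mem_cons_of_mem _ hr) hrp hrb
    · push_neg at hq
      simp only [pvView, if_neg (by tauto : ¬ (q = p ∨ q = base))]
      by_cases hb : pvBlocks base p q
      · simp only [if_pos hb]
        constructor
        · intro h; exact absurd h (by simp)
        · intro h
          exact absurd ((pvBlocks_iff base p q).mp hb) (h q (List.mem_cons_self) hq.1 hq.2)
      · simp only [if_neg hb, ih]
        constructor
        · intro h r hr hrp hrb
          rcases List.mem_cons.mp hr with rfl | h1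
          · exact fun hc => hb ((pvBlocks_iff base p r).mpr hc)
          · exact h r h1 hrp hrb
        · intro h r hr hrp hrb; exact h r (List.mem_cons_of_mem _ hr) hrp hrb


-- delta is zero exactly at the base, and injective for a fixed base
lemma pvDelta_zero_iff (base q : Int × Int) :
    ((pvDelta base q).1 = 0 ∧ (pvDelta base q).2 = 0) ↔ q = base := by
  simp only [pvDelta, Prod.ext_iff]; omega

lemma pvDelta_inj (base q a : Int × Int) (h : pvDelta base q = pvDelta base a) : q = a := by
  simp only [pvDelta, Prod.ext_iff] at h ⊢; omega

lemma pvDelta_ne_zero (base q : Int × Int) (h : q ≠ base) : pvDelta base q ≠ (0, 0) := by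
  intro hc; exact h ((pvDelta_zero_iff base q).mp (by rw [hc]; exact ⟨rfl, rfl⟩))

-- spec-side shape of the first pass: running minimum per key
def pvMerge : Option Int → List Int → Option Int
  | o, [] => o
  | none, g :: gs => pvMerge (some g) gs
  | some m, g :: gs => pvMerge (some (if g < m then g else m)) gs

-- the g-values of the asteroids of direction k
def pvGroup (base : Int × Int) (xs : List (Int × Int)) (k : Int × Int) : List Int :=
  ((xs.map (pvDelta base)).filter
    (fun v => decide (¬(v.1 = 0 ∧ v.2 = 0) ∧ pvN v = k))).map pvG

lemma pvNearest_invariant (base : Int × Int) (xs : List (Int × Int))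
    (d : PySem.Dict (Int × Int) Int) (k : Int × Int) :
    (xs.foldl (fun d a =>
      let v := pvDelta base a
      if v.1 = 0 ∧ v.2 = 0 then d
      else
        match d.get? (pvN v) with
        | none => d.insert (pvN v) (pvG v)
        | some m => if pvG v < m then d.insert (pvN v) (pvG v) else d) d).get? k
      = pvMerge (d.get? k) (pvGroup base xs k) := by
  induction xs generalizing d with
  | nil => rfl
  | cons a rest ih =>
    simp only [List.foldl_cons]
    by_cases h0 : (pvDelta base a).1 = 0 ∧ (pvDelta base a).2 = 0
    · have hgrp : pvGroup base (a :: rest) k = pvGroup base rest k := by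
        simp only [pvGroup, List.map_cons, List.filter_cons]
        rw [if_neg (by simp [h0])]
      rw [if_pos h0, hgrp]
      exact ih d
    · rw [if_neg h0]
      by_cases hk : pvN (pvDelta base a) = k
      · have hgrp : pvGroup base (a :: rest) k
            = pvG (pvDelta base a) :: pvGroup base rest k := by
          simp only [pvGroup, List.map_cons, List.filter_cons]
          rw [if_pos (by simp [h0, hk])]
          simp
        rcases hd : d.get? (pvN (pvDelta base a)) with _ | m
        · simp only [hd]
          rw [hgrp, ih, ← hk, hd, PySem.Dict.get?_insert_self]
          rfl
        · simp only [hd]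
          by_cases hlt : pvG (pvDelta base a) < m
          · rw [if_pos hlt, hgrp, ih, ← hk, hd, PySem.Dict.get?_insert_self]
            show pvMerge (some (pvG (pvDelta base a))) _
              = pvMerge (some (if pvG (pvDelta base a) < m then pvG (pvDelta base a) else m)) _
            rw [if_pos hlt]
          · rw [if_neg hlt, hgrp, ih, ← hk, hd]
            show pvMerge (some m) _
              = pvMerge (some (if pvG (pvDelta base a) < m then pvG (pvDelta base a) else m)) _
            rw [if_neg hlt]
      · have hgrp : pvGroup base (a :: rest) k = pvGroup base rest k := by
          simp only [pvGroup, List.map_cons, List.filter_cons]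
          rw [if_neg (by simp [hk])]
        rcases hd : d.get? (pvN (pvDelta base a)) with _ | m
        · simp only [hd]
          rw [hgrp, ih, PySem.Dict.get?_insert_of_ne _ _ (fun h => hk h.symm)]
        · simp only [hd]
          by_cases hlt : pvG (pvDelta base a) < m
          · rw [if_pos hlt, hgrp, ih, PySem.Dict.get?_insert_of_ne _ _ (fun h => hk h.symm)]
          · rw [if_neg hlt, hgrp]
            exact ih d

lemma pvFoldlMin_le_init (l : List Int) (m : Int) : l.foldl min m ≤ m := by
  induction l generalizing m with
  | nil => exact le_refl m
  | cons g gs ih => exact le_trans (ih (min m g)) (min_le_left m g)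

lemma pvFoldlMin_le_mem (l : List Int) (m x : Int) (hx : x ∈ l) : l.foldl min m ≤ x := by
  induction l generalizing m with
  | nil => cases hx
  | cons g gs ih =>
    rcases List.mem_cons.mp hx with rfl | hx'
    · exact le_trans (pvFoldlMin_le_init gs (min m x)) (min_le_right m x)
    · exact ih (min m g) hx'

lemma pvFoldlMin_mem (l : List Int) (m : Int) : l.foldl min m = m ∨ l.foldl min m ∈ l := by
  induction l generalizing m with
  | nil => exact Or.inl rfl
  | cons g gs ih =>
    rcases ih (min m g) with he | he
    · rcases min_cases m g with ⟨h1, -⟩ | ⟨h1, -⟩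
      · exact Or.inl (by rw [List.foldl_cons, he, h1])
      · exact Or.inr (by rw [List.foldl_cons, he, h1]; exact List.mem_cons_self)
    · exact Or.inr (List.mem_cons_of_mem g he)

lemma pvMerge_some (l : List Int) (m : Int) : pvMerge (some m) l = some (l.foldl min m) := by
  induction l generalizing m with
  | nil => rfl
  | cons g gs ih =>
    have hmin : min m g = if g < m then g else m := by
      rw [min_def]; split_ifs <;> omega
    rw [show pvMerge (some m) (g :: gs) = pvMerge (some (if g < m then g else m)) gs from rfl,
        ih, List.foldl_cons, hmin]

-- the stored per-direction value equals x iff x is a lower bound of its group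
lemma pvMerge_min (L : List Int) (x : Int) (hx : x ∈ L) :
    (pvMerge none L).getD 0 = x ↔ ∀ y ∈ L, x ≤ y := by
  cases L with
  | nil => cases hx
  | cons g gs =>
    rw [show pvMerge none (g :: gs) = pvMerge (some g) gs from rfl, pvMerge_some]
    simp only [Option.getD_some]
    constructor
    · rintro rfl y hy
      rcases List.mem_cons.mp hy with rfl | hy'
      · exact pvFoldlMin_le_init gs y
      · exact pvFoldlMin_le_mem gs g y hy'
    · intro h
      have h1 : gs.foldl min g ≤ x := by
        rcases List.mem_cons.mp hx with rfl | hx'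
        · exact pvFoldlMin_le_init gs x
        · exact pvFoldlMin_le_mem gs g x hx'
      have h2 : x ≤ gs.foldl min g := by
        rcases pvFoldlMin_mem gs g with he | he
        · rw [he]; exact h g List.mem_cons_self
        · exact h _ (List.mem_cons_of_mem g he)
      omega

-- the pointwise bridge: A keeps an asteroid iff B keeps it
lemma pvPoint (xs : List (Int × Int)) (base a : Int × Int) (ha : a ∈ xs) :
    ((¬ a = base ∧ pvView base a xs = true) ↔
      (¬((pvDelta base a).1 = 0 ∧ (pvDelta base a).2 = 0) ∧
        (pvNearest base xs).getD (pvN (pvDelta base a)) 0 = pvG (pvDelta base a))) := by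
  by_cases hab : a = base
  · constructor
    · rintro ⟨h, -⟩; exact absurd hab h
    · rintro ⟨h, -⟩; exact absurd ((pvDelta_zero_iff base a).mpr hab) h
  · have hv : pvDelta base a ≠ (0, 0) := pvDelta_ne_zero base a hab
    have hget : (pvNearest base xs).get? (pvN (pvDelta base a))
        = pvMerge none (pvGroup base xs (pvN (pvDelta base a))) := by
      unfold pvNearest
      rw [pvNearest_invariant base xs PySem.Dict.empty (pvN (pvDelta base a)),
        PySem.Dict.get?_empty]
    have hx : pvG (pvDelta base a) ∈ pvGroup base xs (pvN (pvDelta base a)) := by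
      simp only [pvGroup, List.mem_map, List.mem_filter, decide_eq_true_eq]
      exact ⟨pvDelta base a, ⟨⟨a, ha, rfl⟩,
        fun h => hv (Prod.ext_iff.mpr ⟨h.1, h.2⟩), rfl⟩, rfl⟩
    rw [PySem.Dict.getD_eq_get?_getD, hget, pvMerge_min _ _ hx, pvView_iff]
    constructor
    · rintro ⟨-, h⟩
      refine ⟨fun hc => hv (Prod.ext_iff.mpr ⟨hc.1, hc.2⟩), ?_⟩
      intro y hy
      simp only [pvGroup, List.mem_map, List.mem_filter, decide_eq_true_eq] at hy
      obtain ⟨w, ⟨⟨q, hq, rfl⟩, hw0, hwk⟩, rfl⟩ := hy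
      by_cases hqa : q = a
      · subst hqa; exact le_refl _
      · have hw : pvDelta base q ≠ (0, 0) := by
          intro hc; exact hw0 (by rw [hc]; exact ⟨rfl, rfl⟩)
        have hne : pvDelta base q ≠ pvDelta base a := fun hc => hqa (pvDelta_inj base q a hc)
        by_contra hlt; push_neg at hlt
        have hqb : q ≠ base := fun hc => hw (by rw [hc]; simp [pvDelta])
        exact h q hq hqa hqb ((pvBlocksRel_iff _ _ hv hw hne).mpr ⟨hwk, hlt⟩)
    · rintro ⟨-, h⟩
      refine ⟨hab, ?_⟩
      intro q hq hqa hqb hblk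
      have hw : pvDelta base q ≠ (0, 0) := pvDelta_ne_zero base q hqb
      have hne : pvDelta base q ≠ pvDelta base a := fun hc => hqa (pvDelta_inj base q a hc)
      obtain ⟨hk, hlt⟩ := (pvBlocksRel_iff _ _ hv hw hne).mp hblk
      have hle : pvG (pvDelta base a) ≤ pvG (pvDelta base q) := by
        refine h _ ?_
        simp only [pvGroup, List.mem_map, List.mem_filter, decide_eq_true_eq]
        exact ⟨pvDelta base q, ⟨⟨q, hq, rfl⟩,
          fun hc => hw (Prod.ext_iff.mpr ⟨hc.1, hc.2⟩), hk⟩, rfl⟩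
      omega

-- ===== VERDICT (by name: the statement is the Claim_ definition above) =====
theorem find_lines_of_sight_spec : Claim_equal_find_lines_of_sight := by
  intro xs base _
  show find_lines_of_sight xs base = find_lines_of_sight_alt xs base
  have hA := PySem.List.foldl_congr_mem' xs
    (fun (result : List (Int × Int)) asteroid =>
      if asteroid = base then result
      else if pvView base asteroid xs = true then result ++ [asteroid] else result)
    (fun r a => if (¬ a = base ∧ pvView base a xs = true) then r ++ [a] else r)
    []
    (by
      intro a _ r
      by_cases h1 : a = base
      · simp [h1]
      · by_cases h2 : pvView base a xs <;> simp [h1, h2])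
  have hB := PySem.List.foldl_congr_mem' xs
    (fun (result : List (Int × Int)) asteroid =>
      if (pvDelta base asteroid).1 = 0 ∧ (pvDelta base asteroid).2 = 0 then result
      else if (pvNearest base xs).getD (pvN (pvDelta base asteroid)) 0 = pvG (pvDelta base asteroid)
        then result ++ [asteroid] else result)
    (fun r a => if (¬((pvDelta base a).1 = 0 ∧ (pvDelta base a).2 = 0) ∧
        (pvNearest base xs).getD (pvN (pvDelta base a)) 0 = pvG (pvDelta base a))
      then r ++ [a] else r)
    []
    (by
      intro a _ r
      by_cases h1 : (pvDelta base a).1 = 0 ∧ (pvDelta base a).2 = 0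
      · simp [h1]
      · by_cases h2 :
          (pvNearest base xs).getD (pvN (pvDelta base a)) 0 = pvG (pvDelta base a) <;>
          simp [h1, h2])
  simp only [find_lines_of_sight, find_lines_of_sight_alt]
  rw [hA, hB, PySem.List.foldl_append_ite_eq_filter, PySem.List.foldl_append_ite_eq_filter,
    List.nil_append, List.nil_append]
  exact List.filter_congr (fun a ha => by
    simp only [decide_eq_decide]
    exact pvPoint xs base a ha)
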